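-- pv_equiv track=rewrite | github.com/Ackrome/matplobbot | bot/service.py | convert_html_to_telegram_html
-- ===== SOURCE A (Python) =====
-- def convert_html_to_telegram_html(html_content: str) -> str:
--     """Converts generic HTML to Telegram-supported HTML."""
--     # This is a simplified converter. For complex HTML, a library like `beautifulsoup4` would be better.
--     # The order of replacements is important.
--
--     # Pre-formatted text (code blocks)
--     html_content = html_content.replace('<pre><code>', '<pre>').replace('</code></pre>', '</pre>')
--
--     # Headers to bold
--     for i in range(1, 7):
--         html_content = html_content.replace(f'<h{i}>', '<b>').replace(f'</h{i}>', '</b>\n')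
--
--     # Paragraphs to newlines
--     html_content = html_content.replace('<p>', '').replace('</p>', '\n')
--
--     # Lists
--     html_content = html_content.replace('<ul>', '').replace('</ul>', '')
--     html_content = html_content.replace('<ol>', '').replace('</ol>', '')
--     html_content = html_content.replace('<li>', '• ').replace('</li>', '\n')
--
--     # Bold and Italic
--     html_content = html_content.replace('<em>', '<i>').replace('</em>', '</i>')
--     html_content = html_content.replace('<strong>', '<b>').replace('</strong>', '</b>')
--
--     # Horizontal rule
--     html_content = html_content.replace('<hr>', '---').replace('<hr />', '---')
--
--     # Blockquotes are not directly supported, just remove tags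
--     html_content = html_content.replace('<blockquote>', '').replace('</blockquote>', '\n')
--
--     # Basic table conversion
--     html_content = html_content.replace('<table>', '').replace('</table>', '')
--     html_content = html_content.replace('<thead>', '').replace('</thead>', '')
--     html_content = html_content.replace('<tbody>', '').replace('</tbody>', '')
--     html_content = html_content.replace('<tr>', '').replace('</tr>', '\n')
--     html_content = html_content.replace('<th>', '<b>').replace('</th>', '</b> | ')
--     html_content = html_content.replace('<td>', '').replace('</td>', ' | ')
--
--     # Clean up extra newlines and spaces
--     lines = [line.strip() for line in html_content.split('\n')]
--     return '\n'.join(filter(None, lines))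
-- ===== SOURCE B (Python) =====
-- # Single left-to-right scan with a first-match rule table (one pass over the
-- # text) instead of A's ~40 sequential whole-string .replace passes.
-- _RULES = [('<pre><code>', '<pre>'), ('</code></pre>', '</pre>')]
-- for _i in range(1, 7):
--     _RULES += [('<h%d>' % _i, '<b>'), ('</h%d>' % _i, '</b>\n')]
-- _RULES += [
--     ('<p>', ''), ('</p>', '\n'),
--     ('<ul>', ''), ('</ul>', ''),
--     ('<ol>', ''), ('</ol>', ''),
--     ('<li>', '\u2022 '), ('</li>', '\n'),
--     ('<em>', '<i>'), ('</em>', '</i>'),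
--     ('<strong>', '<b>'), ('</strong>', '</b>'),
--     ('<hr>', '---'), ('<hr />', '---'),
--     ('<blockquote>', ''), ('</blockquote>', '\n'),
--     ('<table>', ''), ('</table>', ''),
--     ('<thead>', ''), ('</thead>', ''),
--     ('<tbody>', ''), ('</tbody>', ''),
--     ('<tr>', ''), ('</tr>', '\n'),
--     ('<th>', '<b>'), ('</th>', '</b> | '),
--     ('<td>', ''), ('</td>', ' | '),
-- ]
--
--
-- def convert_html_to_telegram_html(html_content: str) -> str:
--     """Converts generic HTML to Telegram-supported HTML (one-pass scanner)."""
--     out = []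
--     i = 0
--     n = len(html_content)
--     while i < n:
--         ch = html_content[i]
--         if ch == '<':
--             for old, new in _RULES:
--                 if html_content.startswith(old, i):
--                     out.append(new)
--                     i += len(old)
--                     break
--             else:
--                 out.append(ch)
--                 i += 1
--         else:
--             out.append(ch)
--             i += 1
--     text = ''.join(out)
--     lines = [line.strip() for line in text.split('\n')]
--     return '\n'.join(filter(None, lines))
-- ===== Notes on version B (the rewrite author's own statement) =====
-- stated objective: alternative
-- what changed: Replaces A's ~40 sequential whole-string replace passes with a single left-to-right scan that at each tag opener looks up the first matching tag in an ordered rule table, emits its replacement and jumps past it; the line-strip cleanup is unchanged.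
-- outside the precondition, e.g. on convert_html_to_telegram_html('<t<p>d>'): A returns '', B returns '<td>'
import Mathlib
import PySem

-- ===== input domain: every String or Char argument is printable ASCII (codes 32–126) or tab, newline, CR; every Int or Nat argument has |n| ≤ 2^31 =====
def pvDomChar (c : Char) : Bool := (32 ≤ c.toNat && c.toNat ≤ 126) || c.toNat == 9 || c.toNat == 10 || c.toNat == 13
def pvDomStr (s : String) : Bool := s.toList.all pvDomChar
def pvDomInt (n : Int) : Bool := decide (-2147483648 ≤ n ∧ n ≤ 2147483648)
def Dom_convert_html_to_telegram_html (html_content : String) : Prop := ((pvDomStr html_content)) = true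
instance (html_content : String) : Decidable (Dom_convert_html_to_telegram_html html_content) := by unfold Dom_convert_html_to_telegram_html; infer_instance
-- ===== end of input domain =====

-- B replaces A's ~40 sequential whole-string replace passes with a single left-to-right
-- first-match scan over the text (same rule order); Pre_ excludes the malformed-HTML inputs
-- on which the two strategies legitimately differ (a tag fragment glued to a real tag).


-- ===== PORT A =====
def convert_html_to_telegram_html (html_content : String) : String :=
  let s := PySem.Str.replace (PySem.Str.replace html_content "<pre><code>" "<pre>") "</code></pre>" "</pre>"
  let s := (PySem.List.pyRange 1 7 1).foldl (fun s i =>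
      PySem.Str.replace (PySem.Str.replace s ("<h" ++ PySem.Int.toStr i ++ ">") "<b>")
        ("</h" ++ PySem.Int.toStr i ++ ">") "</b>\n") s
  let s := PySem.Str.replace (PySem.Str.replace s "<p>" "") "</p>" "\n"
  let s := PySem.Str.replace (PySem.Str.replace s "<ul>" "") "</ul>" ""
  let s := PySem.Str.replace (PySem.Str.replace s "<ol>" "") "</ol>" ""
  let s := PySem.Str.replace (PySem.Str.replace s "<li>" "• ") "</li>" "\n"
  let s := PySem.Str.replace (PySem.Str.replace s "<em>" "<i>") "</em>" "</i>"
  let s := PySem.Str.replace (PySem.Str.replace s "<strong>" "<b>") "</strong>" "</b>"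
  let s := PySem.Str.replace (PySem.Str.replace s "<hr>" "---") "<hr />" "---"
  let s := PySem.Str.replace (PySem.Str.replace s "<blockquote>" "") "</blockquote>" "\n"
  let s := PySem.Str.replace (PySem.Str.replace s "<table>" "") "</table>" ""
  let s := PySem.Str.replace (PySem.Str.replace s "<thead>" "") "</thead>" ""
  let s := PySem.Str.replace (PySem.Str.replace s "<tbody>" "") "</tbody>" ""
  let s := PySem.Str.replace (PySem.Str.replace s "<tr>" "") "</tr>" "\n"
  let s := PySem.Str.replace (PySem.Str.replace s "<th>" "<b>") "</th>" "</b> | "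
  let s := PySem.Str.replace (PySem.Str.replace s "<td>" "") "</td>" " | "
  let lines := (PySem.Chars.splitOn s.toList "\n".toList).map PySem.Chars.strip
  String.ofList (PySem.Chars.join "\n".toList (lines.filter (fun l => l ≠ [])))

-- ===== PORT B =====
-- B's ordered rule table (Source B _RULES), and its toList image used by the scanner.
def pvRulesS : List (String × String) :=
  [("<pre><code>", "<pre>"), ("</code></pre>", "</pre>"),
   ("<h1>", "<b>"), ("</h1>", "</b>\n"),
   ("<h2>", "<b>"), ("</h2>", "</b>\n"),
   ("<h3>", "<b>"), ("</h3>", "</b>\n"),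
   ("<h4>", "<b>"), ("</h4>", "</b>\n"),
   ("<h5>", "<b>"), ("</h5>", "</b>\n"),
   ("<h6>", "<b>"), ("</h6>", "</b>\n"),
   ("<p>", ""), ("</p>", "\n"),
   ("<ul>", ""), ("</ul>", ""),
   ("<ol>", ""), ("</ol>", ""),
   ("<li>", "• "), ("</li>", "\n"),
   ("<em>", "<i>"), ("</em>", "</i>"),
   ("<strong>", "<b>"), ("</strong>", "</b>"),
   ("<hr>", "---"), ("<hr />", "---"),
   ("<blockquote>", ""), ("</blockquote>", "\n"),
   ("<table>", ""), ("</table>", ""),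
   ("<thead>", ""), ("</thead>", ""),
   ("<tbody>", ""), ("</tbody>", ""),
   ("<tr>", ""), ("</tr>", "\n"),
   ("<th>", "<b>"), ("</th>", "</b> | "),
   ("<td>", ""), ("</td>", " | ")]

def pvRulesC : List (List Char × List Char) := pvRulesS.map (fun r => (r.1.toList, r.2.toList))

lemma pvKeys_pos : ∀ r ∈ pvRulesC, 0 < r.1.length := by decide

-- the scanner loop of Source B: at each position, emit either the first matching rule's
-- replacement (jumping past the matched tag) or the current character
def pvScanGo (s : List Char) : List Char :=
  match s with
  | [] => []
  | c :: t =>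
    if c = '<' then
      match hf : pvRulesC.find? (fun r => r.1.isPrefixOf (c :: t)) with
      | some r => r.2 ++ pvScanGo ((c :: t).drop r.1.length)
      | none => c :: pvScanGo t
    else c :: pvScanGo t
termination_by s.length
decreasing_by
  · have hmem := List.mem_of_find?_eq_some hf
    have hpos := pvKeys_pos r hmem
    simp; omega
  · simp
  · simp

def convert_html_to_telegram_html_alt (html_content : String) : String :=
  let text := pvScanGo html_content.toList
  let lines := (PySem.Chars.splitOn text "\n".toList).map PySem.Chars.strip
  String.ofList (PySem.Chars.join "\n".toList (lines.filter (fun l => l ≠ [])))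

-- ===== PRECONDITION & SPEC =====
-- Pre_ excludes malformed inputs where a proper prefix fragment of some tag immediately
-- precedes a recognized tag (e.g. "<t<p>d>"): there A's later passes rewrite tags glued
-- together by earlier replacements while B's single scan leaves them; both behaviours are
-- defensible on such glued fragments, which no caller producing HTML emits.
def Pre_convert_html_to_telegram_html (html_content : String) : Prop :=
  ∀ q < html_content.toList.length + 1,
    (∃ r ∈ pvRulesC, r.1 <+: html_content.toList.drop q) →
      ∀ r' ∈ pvRulesC, ∀ a < r'.1.length, 1 ≤ a →
        ¬ (r'.1.take a <:+ html_content.toList.take q)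
instance (html_content : String) : Decidable (Pre_convert_html_to_telegram_html html_content) := by
  unfold Pre_convert_html_to_telegram_html; infer_instance

def pvWitness_convert_html_to_telegram_html : String := "<h1>Title</h1>\n<p>a <b>b</b></p>"

def Spec_convert_html_to_telegram_html (html_content : String) (out : String) : Prop := out = convert_html_to_telegram_html_alt html_content
instance (html_content : String) (out : String) : Decidable (Spec_convert_html_to_telegram_html html_content out) := by unfold Spec_convert_html_to_telegram_html; infer_instance

-- ===== CLAIM (what is proved, stated in full; the proofs are below) =====
def Claim_equal_convert_html_to_telegram_html : Prop := ∀ (html_content : String), Dom_convert_html_to_telegram_html html_content → Pre_convert_html_to_telegram_html html_content → Spec_convert_html_to_telegram_html html_content (convert_html_to_telegram_html html_content)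

-- ===== LEMMAS AND PROOFS =====

-- shorthand for the p-th key / replacement of the table
def pvKey (i : Nat) : List Char := (pvRulesC.getD i ([], [])).1
def pvOut (i : Nat) : List Char := (pvRulesC.getD i ([], [])).2

-- structural-recursion version of Python str.replace (nonempty pattern)
def pvRepl (k o : List Char) : List Char → List Char
  | [] => []
  | c :: t =>
    if h : k.isPrefixOf (c :: t) ∧ k ≠ [] then o ++ pvRepl k o ((c :: t).drop k.length)
    else c :: pvRepl k o t
termination_by s => s.length
decreasing_by
  · have : 0 < k.length := List.length_pos_iff.mpr h.2
    simp; omega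
  · simp

lemma pvRepl_eq_go (old new : List Char) (hold : old ≠ []) :
    ∀ (fuel : Nat) (l acc : List Char), l.length ≤ fuel →
      PySem.Chars.replace.go old new fuel l acc = acc.reverse ++ pvRepl old new l := by
  intro fuel
  induction fuel with
  | zero =>
    intro l acc h
    have hl : l = [] := by
      cases l with
      | nil => rfl
      | cons c t => simp at h
    subst hl
    simp [PySem.Chars.replace.go, pvRepl]
  | succ n ih =>
    intro l acc h
    cases l with
    | nil => simp [PySem.Chars.replace.go, pvRepl]
    | cons c t =>
      by_cases hpre : old.isPrefixOf (c :: t)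
      · have hdl : ((c :: t).drop old.length).length ≤ n := by
          have h1 : 0 < old.length := List.length_pos_iff.mpr hold
          simp only [List.length_drop, List.length_cons] at *
          omega
        rw [show PySem.Chars.replace.go old new (n+1) (c :: t) acc
              = PySem.Chars.replace.go old new n ((c :: t).drop old.length) (new.reverse ++ acc)
            from by rw [PySem.Chars.replace.go]; simp [hpre]]
        rw [ih _ _ hdl]
        rw [show pvRepl old new (c :: t) = new ++ pvRepl old new ((c :: t).drop old.length)
            from by rw [pvRepl]; rw [dif_pos ⟨hpre, hold⟩]]
        simp
      · rw [show PySem.Chars.replace.go old new (n+1) (c :: t) acc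
              = PySem.Chars.replace.go old new n t (c :: acc)
            from by rw [PySem.Chars.replace.go]; simp [hpre]]
        rw [ih _ _ (by simp only [List.length_cons] at h; omega)]
        rw [show pvRepl old new (c :: t) = c :: pvRepl old new t
            from by rw [pvRepl]; rw [dif_neg (by tauto)]]
        simp

lemma pvReplace_eq (old new s : List Char) (hold : old ≠ []) :
    PySem.Chars.replace s old new = pvRepl old new s := by
  rw [PySem.Chars.replace]
  rw [if_neg (by simpa using hold)]
  simpa using pvRepl_eq_go old new hold s.length s [] le_rfl

-- segment decomposition: a parsed input is a list of plain characters and tag indices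
inductive PvSeg where
  | plain : Char → PvSeg
  | tag : Nat → PvSeg
deriving DecidableEq, Repr

-- the text after the first p replace passes, as a function of the segments
def pvRender (p : Nat) : List PvSeg → List Char
  | [] => []
  | .plain c :: rest => c :: pvRender p rest
  | .tag i :: rest => (if i < p then pvOut i else pvKey i) ++ pvRender p rest

-- well-formedness: no key matches at a plain character; tag indices in range
def pvSegsOk : List PvSeg → Prop
  | [] => True
  | .plain c :: rest => (∀ r ∈ pvRulesC, ¬ r.1 <+: (c :: pvRender 0 rest)) ∧ pvSegsOk rest
  | .tag i :: rest => i < pvRulesC.length ∧ pvSegsOk rest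

-- no proper tag-prefix fragment ends directly before a tag (u = text already emitted)
def pvSpre (u : List Char) : List PvSeg → Prop
  | [] => True
  | .plain c :: rest => pvSpre (u ++ [c]) rest
  | .tag i :: rest =>
      (∀ r' ∈ pvRulesC, ∀ a < r'.1.length, 1 ≤ a → ¬ (r'.1.take a <:+ u)) ∧
        pvSpre (u ++ pvKey i) rest

def pvParse (s : List Char) : List PvSeg :=
  match s with
  | [] => []
  | c :: t =>
    match hf : pvRulesC.findIdx? (fun r => r.1.isPrefixOf (c :: t)) with
    | some i => .tag i :: pvParse ((c :: t).drop (pvKey i).length)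
    | none => .plain c :: pvParse t
termination_by s.length
decreasing_by
  · obtain ⟨hi, _, _⟩ := List.findIdx?_eq_some_iff_getElem.mp hf
    have hpos : 0 < (pvKey i).length := by
      have := pvKeys_pos (pvRulesC[i]) (pvRulesC.getElem_mem hi)
      simpa [pvKey, List.getD_eq_getElem?_getD, List.getElem?_eq_getElem hi] using this
    simp; omega
  · simp

-- ===== finite facts about the rule table (checked by decide) =====
def pvFactFb : Bool :=
  (List.range 42).all fun p => (List.range 42).all fun i =>
    (i == p) || (List.range (pvKey i).length).all fun j =>
      !((pvKey p).isPrefixOf ((pvKey i).drop j)) && !(((pvKey i).drop j).isPrefixOf (pvKey p))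

def pvFactGb : Bool :=
  (List.range 42).all fun p => (List.range p).all fun i =>
    (List.range (pvOut i).length).all fun j =>
      !((pvKey p).isPrefixOf ((pvOut i).drop j)) && !(((pvOut i).drop j).isPrefixOf (pvKey p))

set_option maxHeartbeats 2000000 in
lemma pvFactFb_true : pvFactFb = true := by decide

set_option maxHeartbeats 2000000 in
lemma pvFactGb_true : pvFactGb = true := by decide

lemma pvFactF {p i j : Nat} (hp : p < 42) (hi : i < 42) (hne : i ≠ p) (hj : j < (pvKey i).length) :
    ¬ pvKey p <+: (pvKey i).drop j ∧ ¬ (pvKey i).drop j <+: pvKey p := by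
  have hb := pvFactFb_true
  simp only [pvFactFb, List.all_eq_true, List.mem_range, Bool.or_eq_true, beq_iff_eq,
    Bool.and_eq_true, Bool.not_eq_true'] at hb
  rcases hb p hp i hi with h | h
  · exact absurd h hne
  · have h2 := h j hj
    constructor
    · intro hpre; rw [← List.isPrefixOf_iff_prefix] at hpre; simp_all
    · intro hpre; rw [← List.isPrefixOf_iff_prefix] at hpre; simp_all

lemma pvFactG {p i j : Nat} (hp : p < 42) (hi : i < p) (hj : j < (pvOut i).length) :
    ¬ pvKey p <+: (pvOut i).drop j ∧ ¬ (pvOut i).drop j <+: pvKey p := by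
  have hb := pvFactGb_true
  simp only [pvFactGb, List.all_eq_true, List.mem_range, Bool.and_eq_true,
    Bool.not_eq_true'] at hb
  have h2 := hb p hp i hi j hj
  constructor
  · intro hpre; rw [← List.isPrefixOf_iff_prefix] at hpre; simp_all
  · intro hpre; rw [← List.isPrefixOf_iff_prefix] at hpre; simp_all

def pvFactHb : Bool :=
  (List.range 42).all fun p => ((pvKey p).headD ' ' == '<') && decide (2 ≤ (pvKey p).length)

lemma pvFactHb_true : pvFactHb = true := by decide

lemma pvFactHead {p : Nat} (hp : p < 42) : ∃ t, pvKey p = '<' :: t ∧ 1 ≤ t.length := by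
  have hb := pvFactHb_true
  simp only [pvFactHb, List.all_eq_true, List.mem_range, Bool.and_eq_true, beq_iff_eq,
    decide_eq_true_eq] at hb
  obtain ⟨hhead, hlen⟩ := hb p hp
  cases hk : pvKey p with
  | nil => rw [hk] at hlen; simp at hlen
  | cons c t =>
    refine ⟨t, ?_, ?_⟩
    · rw [hk] at hhead; simp at hhead; rw [hhead]
    · rw [hk] at hlen; simp at hlen; omega

lemma pvLenRules : pvRulesC.length = 42 := by decide

lemma pvKey_eq_getElem {i : Nat} (hi : i < 42) : pvKey i = (pvRulesC[i]'(by rw [pvLenRules]; omega)).1 := by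
  simp [pvKey, List.getD_eq_getElem?_getD, List.getElem?_eq_getElem (by rw [pvLenRules]; omega : i < pvRulesC.length)]

lemma pvOut_eq_getElem {i : Nat} (hi : i < 42) : pvOut i = (pvRulesC[i]'(by rw [pvLenRules]; omega)).2 := by
  simp [pvOut, List.getD_eq_getElem?_getD, List.getElem?_eq_getElem (by rw [pvLenRules]; omega : i < pvRulesC.length)]

-- ===== generic list helper =====
lemma pvPrefix_append_cases {k u v : List Char} (h : k <+: u ++ v) :
    k <+: u ∨ (u <+: k ∧ k.drop u.length <+: v) := by
  rcases h with ⟨t, ht⟩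
  rcases List.append_eq_append_iff.mp ht with ⟨a, h1, _⟩ | ⟨b, h1, h2⟩
  · exact Or.inl ⟨a, h1.symm⟩
  · subst h1
    refine Or.inr ⟨⟨b, rfl⟩, ?_⟩
    rw [List.drop_left]
    exact ⟨t, h2.symm⟩

-- ===== a partial match cannot survive to a tag boundary =====
lemma pvWalk (K : List Char) (hK : K ∈ pvRulesC.map Prod.fst) (p : Nat) :
    ∀ segs u a, pvSpre u segs → 1 ≤ a → a < K.length →
      (K.take a <:+ u) → ¬ (K.drop a <+: pvRender 0 segs) →
        ¬ (K.drop a <+: pvRender p segs) := by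
  intro segs
  induction segs with
  | nil =>
    intro u a _ _ hlt _ horig
    simpa [pvRender] using horig
  | cons seg rest ih =>
    intro u a hspre ha hlt hfrag horig hm
    cases seg with
    | plain c =>
      rw [show pvRender p (.plain c :: rest) = c :: pvRender p rest from rfl] at hm
      rw [List.drop_eq_getElem_cons hlt] at hm
      rw [List.cons_prefix_cons] at hm
      obtain ⟨hc, hm'⟩ := hm
      rw [show pvRender 0 (.plain c :: rest) = c :: pvRender 0 rest from rfl,
        List.drop_eq_getElem_cons hlt, List.cons_prefix_cons] at horig
      by_cases hend : a + 1 < K.length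
      · refine ih (u ++ [c]) (a + 1) (by simpa [pvSpre] using hspre) (by omega) hend ?_
          (fun hdr => horig ⟨hc, hdr⟩) hm'
        obtain ⟨w, hw⟩ := hfrag
        refine ⟨w, ?_⟩
        rw [show K.take (a+1) = K.take a ++ [c] from by
          rw [List.take_add_one]; simp [List.getElem?_eq_getElem hlt, hc]]
        rw [← List.append_assoc, hw]
      · have haK : a + 1 = K.length := by omega
        have : K.drop (a+1) = [] := by rw [List.drop_eq_nil_iff]; omega
        exact horig ⟨hc, by rw [this]; exact List.nil_prefix⟩
    | tag i =>
      obtain ⟨hnofrag, _⟩ := hspre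
      obtain ⟨o, hKo⟩ : ∃ o, (K, o) ∈ pvRulesC := by
        obtain ⟨r, hr, hrK⟩ := List.mem_map.mp hK
        exact ⟨r.2, by rwa [show (K, r.2) = r from by rw [← hrK]]⟩
      exact hnofrag (K, o) hKo a hlt ha hfrag

-- ===== one replace pass skips unmatched blocks =====
lemma pvReplSkip (k o : List Char) : ∀ (b t : List Char),
    (∀ j < b.length, ¬ k <+: (b.drop j ++ t)) → pvRepl k o (b ++ t) = b ++ pvRepl k o t := by
  intro b
  induction b with
  | nil => intro t _; simp
  | cons c b' ih =>
    intro t hno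
    have h0 : ¬ k <+: (c :: (b' ++ t)) := by
      have := hno 0 (by simp)
      simpa using this
    rw [show (c :: b') ++ t = c :: (b' ++ t) from rfl]
    rw [pvRepl]
    rw [dif_neg (by
      intro hcon
      exact h0 (List.isPrefixOf_iff_prefix.mp hcon.1))]
    rw [ih t (fun j hj => by
      have := hno (j+1) (by simp; omega)
      simpa using this)]
    simp

-- ===== one replace pass advances the rendering =====
lemma pvPassStep (p : Nat) (hp : p < 42) :
    ∀ segs u, pvSegsOk segs → pvSpre u segs →
      pvRepl (pvKey p) (pvOut p) (pvRender p segs) = pvRender (p + 1) segs := by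
  intro segs
  induction segs with
  | nil => intro u _ _; simp [pvRender, pvRepl]
  | cons seg rest ih =>
    intro u hok hspre
    obtain ⟨kp', hkp, hkplen⟩ := pvFactHead hp
    cases seg with
    | plain c =>
      obtain ⟨hno, hok'⟩ := hok
      have hnom : ¬ pvKey p <+: (c :: pvRender p rest) := by
        intro hm
        by_cases hc : c = '<'
        · subst hc
          rw [hkp, List.cons_prefix_cons] at hm
          obtain ⟨-, hm'⟩ := hm
          have hdrop : (pvKey p).drop 1 = kp' := by rw [hkp]; rfl
          have hK : pvKey p ∈ pvRulesC.map Prod.fst := by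
            rw [pvKey_eq_getElem hp]
            exact List.mem_map_of_mem (pvRulesC.getElem_mem _)
          have horig : ¬ (pvKey p).drop 1 <+: pvRender 0 rest := by
            intro hd
            apply hno (pvRulesC[p]'(by rw [pvLenRules]; omega)) (pvRulesC.getElem_mem _)
            rw [← pvKey_eq_getElem hp, hkp, List.cons_prefix_cons]
            exact ⟨rfl, by rwa [hdrop] at hd⟩
          exact pvWalk (pvKey p) hK p rest (u ++ ['<']) 1
            (by simpa [pvSpre] using hspre) le_rfl (by rw [hkp]; simp only [List.length_cons]; omega)
            (by rw [hkp]; refine ⟨u, ?_⟩; simp)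
            horig (by rwa [hdrop])
        · rw [hkp, List.cons_prefix_cons] at hm
          exact hc hm.1.symm
      show pvRepl (pvKey p) (pvOut p) (c :: pvRender p rest) = c :: pvRender (p+1) rest
      rw [pvRepl]
      rw [dif_neg (fun hcon => hnom (List.isPrefixOf_iff_prefix.mp hcon.1))]
      rw [ih (u ++ [c]) hok' (by simpa [pvSpre] using hspre)]
    | tag i =>
      obtain ⟨hil, hok'⟩ := hok
      have hi42 : i < 42 := by rw [pvLenRules] at hil; exact hil
      obtain ⟨hnofrag, hspre'⟩ := (by simpa [pvSpre] using hspre :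
        (∀ r' ∈ pvRulesC, ∀ a < r'.1.length, 1 ≤ a → ¬ (r'.1.take a <:+ u)) ∧
          pvSpre (u ++ pvKey i) rest)
      by_cases hip : i = p
      · subst hip
        show pvRepl (pvKey i) (pvOut i) ((if i < i then pvOut i else pvKey i) ++ pvRender i rest)
              = (if i < i + 1 then pvOut i else pvKey i) ++ pvRender (i + 1) rest
        rw [if_neg (lt_irrefl i), if_pos (Nat.lt_succ_self i)]
        obtain ⟨ki', hki, _⟩ := pvFactHead hi42
        rw [show pvKey i ++ pvRender i rest = '<' :: (ki' ++ pvRender i rest) from by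
          rw [hki]; rfl]
        rw [pvRepl]
        rw [dif_pos ⟨List.isPrefixOf_iff_prefix.mpr
              (by rw [show ('<' :: (ki' ++ pvRender i rest)) = pvKey i ++ pvRender i rest from by
                    rw [hki]; rfl]
                  exact List.prefix_append _ _),
            by rw [hki]; simp⟩]
        rw [show List.drop (pvKey i).length ('<' :: (ki' ++ pvRender i rest)) = pvRender i rest from by
          rw [show ('<' :: (ki' ++ pvRender i rest)) = pvKey i ++ pvRender i rest from by
                rw [hki]; rfl]
          exact List.drop_left]
        rw [ih (u ++ pvKey i) hok' hspre']
      · have hble : ∀ j < (if i < p then pvOut i else pvKey i).length,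
            ¬ pvKey p <+: ((if i < p then pvOut i else pvKey i).drop j ++ pvRender p rest) := by
          intro j hj hm
          rcases pvPrefix_append_cases hm with h1 | ⟨h2, -⟩
          · by_cases hbi : i < p
            · rw [if_pos hbi] at h1
              exact (pvFactG hp hbi (by rwa [if_pos hbi] at hj)).1 h1
            · rw [if_neg hbi] at h1
              exact (pvFactF hp hi42 hip (by rwa [if_neg hbi] at hj)).1 h1
          · by_cases hbi : i < p
            · rw [if_pos hbi] at h2
              exact (pvFactG hp hbi (by rwa [if_pos hbi] at hj)).2 h2
            · rw [if_neg hbi] at h2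
              exact (pvFactF hp hi42 hip (by rwa [if_neg hbi] at hj)).2 h2
        show pvRepl (pvKey p) (pvOut p) ((if i < p then pvOut i else pvKey i) ++ pvRender p rest)
              = (if i < p + 1 then pvOut i else pvKey i) ++ pvRender (p + 1) rest
        rw [pvReplSkip _ _ _ _ hble]
        rw [ih (u ++ pvKey i) hok' hspre']
        congr 1
        by_cases hbi : i < p
        · rw [if_pos hbi, if_pos (by omega)]
        · rw [if_neg hbi, if_neg (by omega)]

-- ===== the full chain of passes equals the final rendering =====
lemma pvChainFrom (segs : List PvSeg) (u : List Char) (hok : pvSegsOk segs) (hs : pvSpre u segs) :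
    ∀ n p, p + n = 42 →
      (pvRulesC.drop p).foldl (fun t r => pvRepl r.1 r.2 t) (pvRender p segs) = pvRender 42 segs := by
  intro n
  induction n with
  | zero =>
    intro p hpn
    have : p = 42 := by omega
    subst this
    rw [show pvRulesC.drop 42 = [] from by rw [List.drop_eq_nil_iff]; rw [pvLenRules]]
    rfl
  | succ m ih =>
    intro p hpn
    have hp : p < 42 := by omega
    have hpl : p < pvRulesC.length := by rw [pvLenRules]; omega
    rw [List.drop_eq_getElem_cons hpl]
    rw [List.foldl_cons]
    rw [show (pvRulesC[p]'hpl).1 = pvKey p from (pvKey_eq_getElem hp).symm,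
        show (pvRulesC[p]'hpl).2 = pvOut p from (pvOut_eq_getElem hp).symm]
    rw [pvPassStep p hp segs u hok hs]
    exact ih (p + 1) (by omega)

-- ===== the scanner computes the fully-replaced rendering =====
lemma pvScanEq : ∀ segs, pvSegsOk segs → pvScanGo (pvRender 0 segs) = pvRender 42 segs := by
  intro segs
  induction segs with
  | nil => simp [pvRender, pvScanGo]
  | cons seg rest ih =>
    intro hok
    cases seg with
    | plain c =>
      obtain ⟨hno, hok'⟩ := hok
      have hfind : pvRulesC.find? (fun r => r.1.isPrefixOf (c :: pvRender 0 rest)) = none := by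
        apply List.find?_eq_none.mpr
        intro r hr
        simpa using fun hcon => hno r hr (List.isPrefixOf_iff_prefix.mp hcon)
      show pvScanGo (c :: pvRender 0 rest) = c :: pvRender 42 rest
      rw [pvScanGo]
      by_cases hc : c = '<'
      · rw [if_pos hc, hfind, ih hok']
      · rw [if_neg hc, ih hok']
    | tag i =>
      obtain ⟨hil, hok'⟩ := hok
      have hi42 : i < 42 := by rw [pvLenRules] at hil; exact hil
      obtain ⟨ki', hki, _⟩ := pvFactHead hi42
      have hkeyg : pvKey i = (pvRulesC[i]'hil).1 := pvKey_eq_getElem hi42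
      have hshape : pvRender 0 (.tag i :: rest) = '<' :: (ki' ++ pvRender 0 rest) := by
        show (if i < 0 then pvOut i else pvKey i) ++ pvRender 0 rest = _
        rw [if_neg (by omega), hki]; rfl
      have hfind : pvRulesC.find? (fun r => r.1.isPrefixOf ('<' :: (ki' ++ pvRender 0 rest)))
          = some (pvRulesC[i]'hil) := by
        apply List.find?_eq_some_iff_getElem.mpr
        refine ⟨?_, i, hil, rfl, ?_⟩
        · apply List.isPrefixOf_iff_prefix.mpr
          rw [show ('<' :: (ki' ++ pvRender 0 rest)) = pvKey i ++ pvRender 0 rest from by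
            rw [hki]; rfl]
          rw [hkeyg]
          exact List.prefix_append _ _
        · intro j hji
          have hj42 : j < 42 := by omega
          simp only [Bool.not_eq_true']
          apply Bool.not_eq_true _ |>.mp
          intro hcon
          have hpre := List.isPrefixOf_iff_prefix.mp hcon
          rw [show ('<' :: (ki' ++ pvRender 0 rest)) = pvKey i ++ pvRender 0 rest from by
            rw [hki]; rfl] at hpre
          have hkj : (pvRulesC[j]'(by omega)).1 = pvKey j := (pvKey_eq_getElem hj42).symm
          rw [hkj] at hpre
          have hne : i ≠ j := by omega
          rcases pvPrefix_append_cases hpre with h1 | ⟨h2, -⟩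
          · exact (pvFactF (p := j) (i := i) (j := 0) hj42 hi42 hne
              (by rw [hki]; simp)).1 (by simpa using h1)
          · exact (pvFactF (p := j) (i := i) (j := 0) hj42 hi42 hne
              (by rw [hki]; simp)).2 (by simpa using h2)
      rw [hshape, pvScanGo, if_pos rfl, hfind]
      have hdrop : List.drop (pvRulesC[i]'hil).1.length ('<' :: (ki' ++ pvRender 0 rest))
          = pvRender 0 rest := by
        rw [show ('<' :: (ki' ++ pvRender 0 rest)) = pvKey i ++ pvRender 0 rest from by
          rw [hki]; rfl]
        rw [hkeyg]
        exact List.drop_left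
      change (pvRulesC[i]'hil).2
          ++ pvScanGo (List.drop (pvRulesC[i]'hil).1.length ('<' :: (ki' ++ pvRender 0 rest)))
          = pvRender 42 (.tag i :: rest)
      rw [hdrop, ih hok']
      show (pvRulesC[i]'hil).2 ++ pvRender 42 rest
          = (if i < 42 then pvOut i else pvKey i) ++ pvRender 42 rest
      rw [if_pos hi42, ← pvOut_eq_getElem hi42]

-- ===== parsing =====
lemma pvParse_render : ∀ s, pvRender 0 (pvParse s) = s := by
  intro s
  induction s using pvParse.induct with
  | case1 => simp [pvParse, pvRender]
  | case2 c t i hf ih =>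
    rw [pvParse, hf]
    obtain ⟨hi, hpi, -⟩ := List.findIdx?_eq_some_iff_getElem.mp hf
    have hi42 : i < 42 := by rw [pvLenRules] at hi; exact hi
    show (if i < 0 then pvOut i else pvKey i) ++ pvRender 0 (pvParse ((c :: t).drop (pvKey i).length))
        = c :: t
    rw [if_neg (by omega), ih]
    have hpre : pvKey i <+: c :: t := by
      rw [pvKey_eq_getElem hi42]
      exact List.isPrefixOf_iff_prefix.mp (by simpa using hpi)
    exact List.prefix_iff_eq_append.mp hpre
  | case3 c t hf ih =>
    rw [pvParse, hf]
    show c :: pvRender 0 (pvParse t) = c :: t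
    rw [ih]

lemma pvParse_ok : ∀ s, pvSegsOk (pvParse s) := by
  intro s
  induction s using pvParse.induct with
  | case1 => simp [pvParse, pvSegsOk]
  | case2 c t i hf ih =>
    rw [pvParse, hf]
    obtain ⟨hi, -, -⟩ := List.findIdx?_eq_some_iff_getElem.mp hf
    exact ⟨hi, ih⟩
  | case3 c t hf ih =>
    rw [pvParse, hf]
    refine ⟨?_, ih⟩
    intro r hr hcon
    have := List.findIdx?_eq_none_iff.mp hf r hr
    rw [pvParse_render t] at hcon
    simp only [Bool.eq_false_iff] at this
    exact this (List.isPrefixOf_iff_prefix.mpr hcon)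

lemma pvSpre_of_pre (sl : List Char)
    (hpre : ∀ q < sl.length + 1, (∃ r ∈ pvRulesC, r.1 <+: sl.drop q) →
      ∀ r' ∈ pvRulesC, ∀ a < r'.1.length, 1 ≤ a → ¬ (r'.1.take a <:+ sl.take q)) :
    ∀ segs u, pvSegsOk segs → u ++ pvRender 0 segs = sl → pvSpre u segs := by
  intro segs
  induction segs with
  | nil => intro u _ _; trivial
  | cons seg rest ih =>
    intro u hok heq
    cases seg with
    | plain c =>
      show pvSpre (u ++ [c]) rest
      exact ih (u ++ [c]) hok.2 (by simpa using heq)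
    | tag i =>
      obtain ⟨hi, hok'⟩ := hok
      have hi42 : i < 42 := by rw [pvLenRules] at hi; omega
      have hrw : pvRender 0 (.tag i :: rest) = pvKey i ++ pvRender 0 rest := by
        simp [pvRender]
      refine ⟨?_, ih (u ++ pvKey i) hok' (by rw [← heq, hrw]; simp)⟩
      intro r' hr' a halen ha hsuf
      have hq : u.length < sl.length + 1 := by
        rw [← heq]; simp [List.length_append]; try omega
      have hocc : ∃ r ∈ pvRulesC, r.1 <+: sl.drop u.length := by
        refine ⟨pvRulesC[i]'hi, pvRulesC.getElem_mem hi, ?_⟩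
        rw [← heq, List.drop_left, hrw, ← pvKey_eq_getElem hi42]
        exact List.prefix_append _ _
      have := hpre u.length hq hocc r' hr' a halen ha
      rw [← heq, List.take_left] at this
      exact this hsuf

-- ===== main equality on lists =====
lemma pvMainC (sl : List Char)
    (hpre : ∀ q < sl.length + 1, (∃ r ∈ pvRulesC, r.1 <+: sl.drop q) →
      ∀ r' ∈ pvRulesC, ∀ a < r'.1.length, 1 ≤ a → ¬ (r'.1.take a <:+ sl.take q)) :
    pvRulesC.foldl (fun t r => pvRepl r.1 r.2 t) sl = pvScanGo sl := by
  have hok := pvParse_ok sl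
  have hrend := pvParse_render sl
  have hspre := pvSpre_of_pre sl hpre (pvParse sl) [] hok (by simpa using hrend)
  have h1 := pvChainFrom (pvParse sl) [] hok hspre 42 0 rfl
  rw [List.drop_zero, hrend] at h1
  have h2 := pvScanEq (pvParse sl) hok
  rw [hrend] at h2
  rw [h1, ← h2]

-- A's chained string-level replaces are the list-level pvRepl fold
lemma pvStrFold : ∀ (rs : List (String × String)) (x : String), (∀ r ∈ rs, r.1.toList ≠ []) →
    (rs.foldl (fun t r => PySem.Str.replace t r.1 r.2) x).toList
      = (rs.map fun r => (r.1.toList, r.2.toList)).foldl (fun t r => pvRepl r.1 r.2 t) x.toList := by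
  intro rs
  induction rs with
  | nil => intro x _; rfl
  | cons r rs ih =>
    intro x h
    simp only [List.foldl_cons, List.map_cons]
    rw [ih (PySem.Str.replace x r.1 r.2) (fun r' hr' => h r' (by simp [hr']))]
    congr 1
    rw [PySem.Str.toList_replace]
    exact pvReplace_eq _ _ _ (h r (by simp))

-- ===== VERDICT (by name: the statement is the Claim_ definition above) =====
theorem convert_html_to_telegram_html_spec : Claim_equal_convert_html_to_telegram_html := by
  intro s _ hpre
  show convert_html_to_telegram_html s = convert_html_to_telegram_html_alt s
  have hA : convert_html_to_telegram_html s
      = String.ofList (PySem.Chars.join "\n".toList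
          ((((PySem.Chars.splitOn (pvRulesS.foldl (fun t r => PySem.Str.replace t r.1 r.2) s).toList
              "\n".toList)).map PySem.Chars.strip).filter (fun l => l ≠ []))) := rfl
  have hB : convert_html_to_telegram_html_alt s
      = String.ofList (PySem.Chars.join "\n".toList
          ((((PySem.Chars.splitOn (pvScanGo s.toList)
              "\n".toList)).map PySem.Chars.strip).filter (fun l => l ≠ []))) := rfl
  rw [hA, hB]
  have hfold := pvStrFold pvRulesS s (by decide)
  have hmain := pvMainC s.toList hpre
  rw [hfold, show (pvRulesS.map fun r => (r.1.toList, r.2.toList)) = pvRulesC from rfl, hmain]
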